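-- pv_equiv track=rewrite | github.com/dark19cs/Memory-Puzzle-Game- | Memory Puzzle/hint_logic.py | use_hint
-- ===== SOURCE A (Python) =====
-- def use_hint(cards, revealed):
--     seen = {}
--     for i, c in enumerate(cards):
--         if revealed[i]: continue
--         if c in seen:
--             return seen[c], i
--         seen[c] = i
--     return None
-- ===== SOURCE B (Python) =====
-- def use_hint(cards, revealed):
--     for i, c in enumerate(cards):
--         if revealed[i]: continue
--         for j in range(i):
--             if not revealed[j] and cards[j] == c:
--                 return j, i
--     return None
-- ===== Notes on version B (the rewrite author's own statement) =====
-- stated objective: alternative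
-- what changed: Replaces the single-pass hash index ('seen' dict) with a nested backward scan: for each unrevealed card, rescan the earlier indices for the first unrevealed equal card; no auxiliary state is kept.
import Mathlib
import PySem

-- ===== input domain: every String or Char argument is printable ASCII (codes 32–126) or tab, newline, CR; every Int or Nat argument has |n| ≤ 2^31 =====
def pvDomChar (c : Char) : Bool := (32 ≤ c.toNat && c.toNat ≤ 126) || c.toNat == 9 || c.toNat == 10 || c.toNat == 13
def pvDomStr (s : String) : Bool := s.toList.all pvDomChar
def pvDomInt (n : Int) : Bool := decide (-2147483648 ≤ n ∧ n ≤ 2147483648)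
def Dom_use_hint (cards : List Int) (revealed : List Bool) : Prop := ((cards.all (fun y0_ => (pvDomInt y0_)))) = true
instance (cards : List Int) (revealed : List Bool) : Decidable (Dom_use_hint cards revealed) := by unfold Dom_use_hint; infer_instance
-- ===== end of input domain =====

-- B replaces A's single-pass 'seen' hash index with a stateless nested backward scan (alternative decomposition, same results).

-- ===== PORT A =====
-- 'for i, c in enumerate(cards)' as structural recursion on the remaining cards with index counter i;
-- 'revealed[i]' via pyGet? (none = IndexError, excluded by Pre_); 'c in seen / seen[c]' as one Dict.get? match.
def useHintA_go (revealed : List Bool) : Nat → PySem.Dict Int Int → List Int → Option (Int × Int)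
  | _, _, [] => none
  | i, seen, c :: rest =>
    match PySem.List.pyGet? revealed (i : Int) with
    | none => none          -- IndexError: outside Pre_
    | some true => useHintA_go revealed (i + 1) seen rest
    | some false =>
      match seen.get? c with
      | some j => some (j, (i : Int))
      | none => useHintA_go revealed (i + 1) (seen.insert c (i : Int)) rest

def use_hint (cards : List Int) (revealed : List Bool) : Option (Int × Int) :=
  useHintA_go revealed 0 PySem.Dict.empty cards

-- ===== PORT B =====
-- inner 'for j in range(i): if not revealed[j] and cards[j] == c: return j, i'.
-- Every j reached satisfies j < i ≤ len(revealed), len(cards), so the getD/getElem? defaults are unreachable.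
def useHintB_scan (cards : List Int) (revealed : List Bool) (c : Int) : List Nat → Option Nat
  | [] => none
  | j :: rest =>
    if revealed.getD j true = false ∧ cards[j]? = some c then some j
    else useHintB_scan cards revealed c rest

def useHintB_go (cards : List Int) (revealed : List Bool) : Nat → List Int → Option (Int × Int)
  | _, [] => none
  | i, c :: rest =>
    match PySem.List.pyGet? revealed (i : Int) with
    | none => none          -- IndexError: outside Pre_
    | some true => useHintB_go cards revealed (i + 1) rest
    | some false =>
      match useHintB_scan cards revealed c (List.range i) with
      | some j => some ((j : Int), (i : Int))
      | none => useHintB_go cards revealed (i + 1) rest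

def use_hint_alt (cards : List Int) (revealed : List Bool) : Option (Int × Int) :=
  useHintB_go cards revealed 0 cards

-- ===== PRECONDITION & SPEC =====
-- Pre_ holds exactly where Python A returns (no IndexError): either revealed is at least as long as
-- cards, or some unrevealed matching pair exists at an index below len(revealed) — then A returns
-- before reaching the out-of-range access.  (B raises on exactly the same inputs.)
def Pre_use_hint (cards : List Int) (revealed : List Bool) : Prop :=
  cards.length ≤ revealed.length ∨
  ∃ i : Fin cards.length, revealed.getD i.1 true = false ∧
    ∃ j : Fin i.1, revealed.getD j.1 true = false ∧ cards.getD j.1 0 = cards.getD i.1 0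
instance (cards : List Int) (revealed : List Bool) : Decidable (Pre_use_hint cards revealed) := by
  unfold Pre_use_hint; infer_instance

def pvWitness_use_hint : List Int × List Bool := ([3, 7, 3], [false, true, false])

def Spec_use_hint (cards : List Int) (revealed : List Bool) (out : Option (Int × Int)) : Prop := out = use_hint_alt cards revealed
instance (cards : List Int) (revealed : List Bool) (out : Option (Int × Int)) : Decidable (Spec_use_hint cards revealed out) := by unfold Spec_use_hint; infer_instance

-- ===== CLAIM (what is proved, stated in full; the proofs are below) =====
def Claim_equal_use_hint : Prop := ∀ (cards : List Int) (revealed : List Bool), Dom_use_hint cards revealed → Pre_use_hint cards revealed → Spec_use_hint cards revealed (use_hint cards revealed)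

-- ===== LEMMAS AND PROOFS =====

-- B's inner scan distributes over an appended index list.
lemma scan_append (cards : List Int) (revealed : List Bool) (c : Int) (l₁ l₂ : List Nat) :
    useHintB_scan cards revealed c (l₁ ++ l₂)
      = (useHintB_scan cards revealed c l₁).orElse (fun _ => useHintB_scan cards revealed c l₂) := by
  induction l₁ with
  | nil => simp [useHintB_scan]
  | cons j rest ih =>
    simp only [List.cons_append, useHintB_scan]
    split_ifs <;> simp [ih]

-- Loop invariant: A's 'seen' dict answers exactly what B's scan over the already-processed indices answers.
lemma go_eq (cards : List Int) (revealed : List Bool) :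
    ∀ (rest : List Int) (i : Nat) (seen : PySem.Dict Int Int),
      cards.drop i = rest →
      (∀ c : Int, seen.get? c
          = (useHintB_scan cards revealed c (List.range i)).map (fun j => (j : Int))) →
      useHintA_go revealed i seen rest = useHintB_go cards revealed i rest := by
  intro rest
  induction rest with
  | nil => intro i seen _ _; rfl
  | cons c rest' ih =>
    intro i seen hdrop hinv
    have hci : cards[i]? = some c := by
      have h0 : (cards.drop i)[0]? = some c := by rw [hdrop]; rfl
      simpa using h0
    have hdrop' : cards.drop (i + 1) = rest' := by
      have : cards.drop (i + 1) = (cards.drop i).tail := by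
        rw [← List.drop_drop]; simp
      rw [this, hdrop]; rfl
    simp only [useHintA_go, useHintB_go]
    cases hrev : PySem.List.pyGet? revealed (i : Int) with
    | none => rfl
    | some b =>
      have hrevi : revealed[i]? = some b := by simpa using hrev
      cases b with
      | true =>
        apply ih (i + 1) seen hdrop'
        intro d
        rw [List.range_succ, scan_append, hinv d]
        have : useHintB_scan cards revealed d [i] = none := by
          simp [useHintB_scan, List.getD_eq_getElem?_getD, hrevi]
        simp [this]
      | false =>
        have hgetD : revealed.getD i true = false := by
          simp [List.getD_eq_getElem?_getD, hrevi]
        cases hs : seen.get? c with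
        | some j =>
          have := hinv c
          rw [hs] at this
          cases hscan : useHintB_scan cards revealed c (List.range i) with
          | none => rw [hscan] at this; simp at this
          | some j₀ =>
            rw [hscan] at this
            simp at this
            simp [this]
        | none =>
          have hscan : useHintB_scan cards revealed c (List.range i) = none := by
            have := hinv c
            rw [hs] at this
            cases h' : useHintB_scan cards revealed c (List.range i) with
            | none => rfl
            | some j₀ => rw [h'] at this; simp at this
          rw [hscan]
          apply ih (i + 1) (seen.insert c (i : Int)) hdrop'
          intro d
          rw [List.range_succ, scan_append, PySem.Dict.get?_insert]
          by_cases hd : d = c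
          · subst hd
            rw [hinv d, hscan]
            simp [useHintB_scan, hrevi, hci]
          · rw [hinv d]
            have hnone : useHintB_scan cards revealed d [i] = none := by
              simp [useHintB_scan, hrevi, hci]
              intro h; exact absurd h.symm hd
            cases h' : useHintB_scan cards revealed d (List.range i) <;>
              simp [hnone] <;> exact fun h => absurd h hd

-- ===== VERDICT (by name: the statement is the Claim_ definition above) =====
theorem use_hint_spec : Claim_equal_use_hint := by
  intro cards revealed _ _
  unfold Spec_use_hint use_hint use_hint_alt
  apply go_eq cards revealed cards 0 PySem.Dict.empty (by simp)
  intro c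
  simp [useHintB_scan, PySem.Dict.get?_empty]
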